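-- pv_equiv track=rewrite | github.com/therealmasterchief/machine-learning | mlassign9.py | is_power_of_8
-- ===== SOURCE A (Python) =====
-- def is_power_of_8(n):
--     if n <= 0:
--         return False
--     if n & (n - 1) == 0:
--
--         position = 0
--         while n > 1:
--             n >>= 1
--             position += 1
--         return position % 3 == 0
--     return False
-- ===== SOURCE B (Python) =====
-- def is_power_of_8(n):
--     if n <= 0:
--         return False
--     while n > 1:
--         if n % 8 != 0:
--             return False
--         n //= 8
--     return True
-- ===== Notes on version B (the rewrite author's own statement) =====
-- stated objective: simpler
-- what changed: Replaces the power-of-two bitmask test plus bit-shift counting loop (position % 3) by a single repeated-division-by-8 loop.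
import Mathlib
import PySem

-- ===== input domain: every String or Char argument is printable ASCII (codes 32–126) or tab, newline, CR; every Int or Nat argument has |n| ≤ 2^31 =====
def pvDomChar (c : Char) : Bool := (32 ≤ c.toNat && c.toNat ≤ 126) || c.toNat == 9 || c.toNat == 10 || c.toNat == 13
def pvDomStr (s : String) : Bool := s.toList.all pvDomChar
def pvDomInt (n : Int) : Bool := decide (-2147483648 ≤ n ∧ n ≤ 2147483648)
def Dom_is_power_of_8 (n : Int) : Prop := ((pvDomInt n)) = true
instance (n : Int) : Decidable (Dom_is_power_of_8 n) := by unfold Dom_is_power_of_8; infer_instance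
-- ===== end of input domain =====

-- B replaces the bitmask power-of-two test plus shift-counting loop by one repeated-division-by-8 loop (objective: simpler).

-- ===== PORT A =====
-- while n > 1: n >>= 1; position += 1   (Python >> on int = Lean Int >>> with a Nat shift amount)
def pvShiftLoop (n : Int) (position : Int) : Int :=
  if 1 < n then pvShiftLoop (n >>> (1 : Nat)) (position + 1) else position
termination_by n.toNat
decreasing_by
  rename_i h
  have hn : n = ((n.toNat : Nat) : Int) := by omega
  rw [hn, ← Int.natCast_shiftRight]
  simp only [Int.toNat_natCast]
  have : n.toNat >>> 1 = n.toNat / 2 := by simp [Nat.shiftRight_eq_div_pow]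
  omega

def is_power_of_8 (n : Int) : Bool :=
  if n ≤ 0 then false
  else if PySem.Int.band n (n - 1) == 0 then (pvShiftLoop n 0) % 3 == 0
  else false

-- ===== PORT B =====
-- while n > 1: if n % 8 != 0: return False; n //= 8
def pvDiv8Loop (n : Int) : Bool :=
  if 1 < n then
    if PySem.Int.mod n 8 ≠ 0 then false
    else pvDiv8Loop (PySem.Int.floordiv n 8)
  else true
termination_by n.toNat
decreasing_by
  rw [PySem.Int.floordiv_eq_ediv_of_pos (by omega)]
  omega

def is_power_of_8_alt (n : Int) : Bool :=
  if n ≤ 0 then false else pvDiv8Loop n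

-- ===== PRECONDITION & SPEC =====
def Spec_is_power_of_8 (n : Int) (out : Bool) : Prop := out = is_power_of_8_alt n
instance (n : Int) (out : Bool) : Decidable (Spec_is_power_of_8 n out) := by unfold Spec_is_power_of_8; infer_instance

-- ===== CLAIM (what is proved, stated in full; the proofs are below) =====
def Claim_equal_is_power_of_8 : Prop := ∀ (n : Int), Dom_is_power_of_8 n → Spec_is_power_of_8 n (is_power_of_8 n)

-- ===== LEMMAS AND PROOFS =====

-- B's loop accepts exactly the powers of 8
theorem pvDiv8Loop_iff (m : Nat) (hm : 1 ≤ m) :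
    (pvDiv8Loop (m : Int) = true ↔ ∃ k : Nat, m = 8 ^ k) := by
  induction m using Nat.strong_induction_on with
  | _ m ih =>
    rw [pvDiv8Loop]
    by_cases h1 : 1 < (m : Int)
    · rw [if_pos h1]
      have hm2 : 2 ≤ m := by exact_mod_cast h1
      rw [show ((8:Int)) = ((8:Nat):Int) from rfl, PySem.Int.mod_natCast m 8,
          PySem.Int.floordiv_natCast m 8]
      by_cases hmod : m % 8 = 0
      · have hdvd : 8 ∣ m := Nat.dvd_of_mod_eq_zero hmod
        have h8le : 8 ≤ m := Nat.le_of_dvd (by omega) hdvd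
        rw [if_neg (by simp [hmod])]
        rw [ih (m / 8) (by omega) (by omega)]
        constructor
        · rintro ⟨k, hk⟩
          exact ⟨k + 1, by rw [pow_succ]; omega⟩
        · rintro ⟨k, hk⟩
          match k with
          | 0 => omega
          | k + 1 =>
            refine ⟨k, ?_⟩
            rw [pow_succ] at hk
            omega
      · rw [if_pos (by exact_mod_cast hmod)]
        constructor
        · intro h; cases h
        · rintro ⟨k, hk⟩
          match k with
          | 0 => omega
          | k + 1 =>
            have : 8 ∣ m := ⟨8 ^ k, by rw [hk, pow_succ]; ring⟩
            exact absurd (Nat.mod_eq_zero_of_dvd this) hmod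
    · have hm1 : m = 1 := by omega
      rw [if_neg h1]
      subst hm1
      exact ⟨fun _ => ⟨0, rfl⟩, fun _ => rfl⟩

-- A's shift loop counts the exponent of a power of two
theorem pvShiftLoop_pow (j : Nat) : ∀ p : Int, pvShiftLoop ((2 ^ j : Nat) : Int) p = p + j := by
  induction j with
  | zero =>
    intro p
    rw [pvShiftLoop.eq_def]
    norm_num
  | succ j ih =>
    intro p
    rw [pvShiftLoop.eq_def]
    have h1 : (1 : Int) < ((2 ^ (j + 1) : Nat) : Int) := by
      have h2 : 1 < 2 ^ (j + 1) := Nat.one_lt_two_pow_iff.mpr (by omega)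
      exact_mod_cast h2
    rw [if_pos h1, ← Int.natCast_shiftRight]
    have hsh : (2 ^ (j + 1)) >>> 1 = 2 ^ j := by
      rw [Nat.shiftRight_eq_div_pow, pow_succ, pow_one]
      omega
    rw [hsh, ih]
    push_cast
    ring

-- the bitmask test m & (m-1) == 0 characterises powers of two
theorem land_pred_iff (m : Nat) (hm : 1 ≤ m) :
    (m &&& (m - 1) = 0 ↔ ∃ j : Nat, m = 2 ^ j) := by
  induction m using Nat.strong_induction_on with
  | _ m ih =>
    rcases eq_or_lt_of_le hm with h1 | h2
    · -- m = 1
      rw [← h1]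
      exact ⟨fun _ => ⟨0, rfl⟩, fun _ => by decide⟩
    · rcases Nat.mod_two_eq_zero_or_one m with hpar | hpar
      · -- even m ≥ 2
        obtain ⟨a, ha⟩ : ∃ a, m = 2 * a := ⟨m / 2, by omega⟩
        have ha1 : 1 ≤ a := by omega
        have hb : m - 1 = 2 * (a - 1) + 1 := by omega
        have hland : m &&& (m - 1) = 2 * (a &&& (a - 1)) := by
          rw [hb, ha]
          have := Nat.land_bit false a true (a - 1)
          simpa [Nat.bit] using this
        rw [hland]
        have hih := ih a (by omega) ha1
        constructor
        · intro h
          obtain ⟨j, hj⟩ := hih.mp (by omega)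
          exact ⟨j + 1, by rw [ha, hj, pow_succ]; ring⟩
        · rintro ⟨j, hj⟩
          match j with
          | 0 => omega
          | j + 1 =>
            have haj : a = 2 ^ j := by rw [pow_succ] at hj; omega
            have := hih.mpr ⟨j, haj⟩
            omega
      · -- odd m ≥ 3
        obtain ⟨a, ha⟩ : ∃ a, m = 2 * a + 1 := ⟨m / 2, by omega⟩
        have ha1 : 1 ≤ a := by omega
        have hb : m - 1 = 2 * a := by omega
        have hland : m &&& (m - 1) = 2 * (a &&& a) := by
          rw [hb, ha]
          have := Nat.land_bit true a false a
          simpa [Nat.bit] using this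
        rw [hland, Nat.and_self]
        constructor
        · intro h
          exact absurd h (by omega)
        · rintro ⟨j, hj⟩
          match j with
          | 0 => omega
          | j + 1 =>
            exfalso
            have : 2 ∣ m := ⟨2 ^ j, by rw [hj, pow_succ]; ring⟩
            omega

theorem pow2_pow8 (j : Nat) : ((∃ k : Nat, 2 ^ j = 8 ^ k) ↔ j % 3 = 0) := by
  constructor
  · rintro ⟨k, hk⟩
    have h8 : (8 : Nat) = 2 ^ 3 := by norm_num
    rw [h8, ← pow_mul] at hk
    have hj : j = 3 * k := Nat.pow_right_injective (by omega) hk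
    omega
  · intro h
    refine ⟨j / 3, ?_⟩
    rw [show (8 : Nat) = 2 ^ 3 by norm_num, ← pow_mul]
    congr 1
    omega

-- ===== VERDICT (by name: the statement is the Claim_ definition above) =====
theorem is_power_of_8_spec : Claim_equal_is_power_of_8 := by
  intro n _
  unfold Spec_is_power_of_8 is_power_of_8 is_power_of_8_alt
  by_cases hn : n ≤ 0
  · simp [hn]
  · simp only [hn, if_false]
    obtain ⟨m, hm, hm1⟩ : ∃ m : Nat, n = (m : Int) ∧ 1 ≤ m :=
      ⟨n.toNat, by omega, by omega⟩
    subst hm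
    have hcast : PySem.Int.band (m : Int) ((m : Int) - 1) = ((m &&& (m - 1) : Nat) : Int) := by
      have h1 : ((m : Int) - 1) = ((m - 1 : Nat) : Int) := by omega
      rw [h1, PySem.Int.band_natCast]
    by_cases hland : m &&& (m - 1) = 0
    · -- n is a power of two
      obtain ⟨j, hj⟩ := (land_pred_iff m hm1).mp hland
      have hguard : (PySem.Int.band (m : Int) ((m : Int) - 1) == 0) = true := by
        rw [hcast, hland]; rfl
      rw [hguard]
      simp only [if_true]
      subst hj
      rw [pvShiftLoop_pow j 0]
      have hB := pvDiv8Loop_iff (2 ^ j) Nat.one_le_two_pow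
      rw [pow2_pow8] at hB
      by_cases h3 : j % 3 = 0
      · rw [hB.mpr h3]
        simp only [beq_iff_eq]
        omega
      · have hBf : pvDiv8Loop ((2 ^ j : Nat) : Int) = false := by
          cases h : pvDiv8Loop ((2 ^ j : Nat) : Int)
          · rfl
          · exact absurd (hB.mp h) h3
        rw [hBf]
        simp only [beq_eq_false_iff_ne, ne_eq]
        omega
    · -- not a power of two: both sides false
      have hguard : (PySem.Int.band (m : Int) ((m : Int) - 1) == 0) = false := by
        rw [hcast]
        simp only [beq_eq_false_iff_ne, ne_eq]
        exact_mod_cast hland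
      rw [hguard, if_neg (by simp)]
      cases h : pvDiv8Loop (m : Int)
      · rfl
      · exfalso
        obtain ⟨k, hk⟩ := (pvDiv8Loop_iff m hm1).mp h
        have hpw : ∃ j : Nat, m = 2 ^ j := ⟨3 * k, by rw [hk, pow_mul]; norm_num⟩
        exact hland ((land_pred_iff m hm1).mpr hpw)
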